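-- pv_equiv track=rewrite | github.com/jneeee/taskbox | src/taskbox/user_task/checkin189.py | _b64_to_hex
-- ===== SOURCE A (Python) =====
-- def _b64_to_hex(a):
--     def _chr(a):
--         return "0123456789abcdefghijklmnopqrstuvwxyz"[a]
--     b64map = "ABCDEFGHIJKLMNOPQRSTUVWXYZabcdefghijklmnopqrstuvwxyz0123456789+/"
--     d = ""
--     e = 0
--     c = 0
--     for i in range(len(a)):
--         if list(a)[i] != "=":
--             v = b64map.index(list(a)[i])
--             if 0 == e:
--                 e = 1
--                 d += _chr(v >> 2)
--                 c = 3 & v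
--             elif 1 == e:
--                 e = 2
--                 d += _chr(c << 2 | v >> 4)
--                 c = 15 & v
--             elif 2 == e:
--                 e = 3
--                 d += _chr(c)
--                 d += _chr(v >> 2)
--                 c = 3 & v
--             else:
--                 e = 0
--                 d += _chr(c << 2 | v >> 4)
--                 d += _chr(15 & v)
--     if e == 1:
--         d += _chr(c << 2)
--     return d
-- ===== SOURCE B (Python) =====
-- def _b64_to_hex(a):
--     alphabet = "0123456789abcdefghijklmnopqrstuvwxyz"
--     b64map = "ABCDEFGHIJKLMNOPQRSTUVWXYZabcdefghijklmnopqrstuvwxyz0123456789+/"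
--     vals = [b64map.index(ch) for ch in a if ch != "="]
--
--     def nibbles(w, k):
--         digits = []
--         for _ in range(k):
--             w, r = divmod(w, 16)
--             digits.append(alphabet[r])
--         return "".join(reversed(digits))
--
--     out = []
--     i = 0
--     while i + 4 <= len(vals):
--         w = ((vals[i] * 64 + vals[i + 1]) * 64 + vals[i + 2]) * 64 + vals[i + 3]
--         out.append(nibbles(w, 6))
--         i += 4
--     rem = vals[i:]
--     if len(rem) == 1:
--         out.append(nibbles(rem[0] * 4, 2))
--     elif len(rem) == 2:
--         out.append(nibbles((rem[0] * 64 + rem[1]) // 16, 2))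
--     elif len(rem) == 3:
--         out.append(nibbles((rem[0] * 4096 + rem[1] * 64 + rem[2]) // 4, 4))
--     return "".join(out)
-- ===== Notes on version B (the rewrite author's own statement) =====
-- stated objective: faster
-- what changed: Replaces the per-character 4-state machine (which rebuilds list(a) on every iteration) by a single pass that collects the 6-bit values once and then packs them in blocks of 4 into 24-bit integers emitted as 6 nibbles via divmod, with three closed-form tail cases.
import Mathlib
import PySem

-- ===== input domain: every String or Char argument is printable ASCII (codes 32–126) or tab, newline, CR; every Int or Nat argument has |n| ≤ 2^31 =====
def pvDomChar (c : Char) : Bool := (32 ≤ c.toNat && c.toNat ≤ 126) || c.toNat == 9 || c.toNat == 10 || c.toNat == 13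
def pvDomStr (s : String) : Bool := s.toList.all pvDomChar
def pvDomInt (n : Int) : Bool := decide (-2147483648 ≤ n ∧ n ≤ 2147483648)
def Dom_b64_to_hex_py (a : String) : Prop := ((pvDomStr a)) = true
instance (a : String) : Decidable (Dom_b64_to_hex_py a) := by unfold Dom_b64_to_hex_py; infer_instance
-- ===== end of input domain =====

-- B replaces A's per-character 4-state machine (which rebuilds list(a) every iteration, O(n^2))
-- by one pass collecting the 6-bit values and packing them in blocks of 4 (O(n)); return values equal on Pre_.

-- ===== PORT A =====
-- the hex-digit alphabet "0123456789abcdefghijklmnopqrstuvwxyz"[n]; indexing is exact for n < 36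
-- (every index A produces is < 16); out-of-range (IndexError in Python) is unreachable, getD "" is a dead default.
def pvChrA (n : Nat) : String :=
  ((PySem.Str.pyGet? "0123456789abcdefghijklmnopqrstuvwxyz" (n : Int)).map String.singleton).getD ""

def pvB64map : List Char := "ABCDEFGHIJKLMNOPQRSTUVWXYZabcdefghijklmnopqrstuvwxyz0123456789+/".toList

-- b64map.index(ch): exact for ch ∈ b64map; Python raises ValueError otherwise (excluded by Pre_).
def pvIdxA (ch : Char) : Nat := pvB64map.idxOf ch

-- one iteration of A's for-loop: state (d, e, c)
def pvStepA (st : String × Nat × Nat) (ch : Char) : String × Nat × Nat :=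
  if ch = '=' then st
  else
    let v := pvIdxA ch
    let d := st.1; let e := st.2.1; let c := st.2.2
    if e = 0 then (d ++ pvChrA (v >>> 2), 1, 3 &&& v)
    else if e = 1 then (d ++ pvChrA (c <<< 2 ||| v >>> 4), 2, 15 &&& v)
    else if e = 2 then (d ++ pvChrA c ++ pvChrA (v >>> 2), 3, 3 &&& v)
    else (d ++ pvChrA (c <<< 2 ||| v >>> 4) ++ pvChrA (15 &&& v), 0, c)

def b64_to_hex_py (a : String) : String :=
  let st := a.toList.foldl pvStepA ("", 0, 0)
  if st.2.1 = 1 then st.1 ++ pvChrA (st.2.2 <<< 2) else st.1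

-- ===== PORT B =====
def pvNibChar (n : Nat) : String :=
  ((PySem.Str.pyGet? "0123456789abcdefghijklmnopqrstuvwxyz" (n : Int)).map String.singleton).getD ""

def pvIdxB (ch : Char) : Nat := pvB64map.idxOf ch

-- nibbles(w, k): k hex digits of w, least significant first, then reversed and joined
def pvNibDigits : Nat → Nat → List String
  | _, 0 => []
  | w, k + 1 => pvNibChar (w % 16) :: pvNibDigits (w / 16) k

def pvNibbles (w k : Nat) : String := String.join (pvNibDigits w k).reverse

-- the while-loop over blocks of 4 plus the three tail cases
def pvPackB : List Nat → String
  | v0 :: v1 :: v2 :: v3 :: rest =>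
      pvNibbles (((v0 * 64 + v1) * 64 + v2) * 64 + v3) 6 ++ pvPackB rest
  | [v0] => pvNibbles (v0 * 4) 2
  | [v0, v1] => pvNibbles ((v0 * 64 + v1) / 16) 2
  | [v0, v1, v2] => pvNibbles ((v0 * 4096 + v1 * 64 + v2) / 4) 4
  | [] => ""

def b64_to_hex_py_alt (a : String) : String :=
  pvPackB ((a.toList.filter (fun ch => ch ≠ '=')).map pvIdxB)

-- ===== PRECONDITION & SPEC =====
-- Pre_ excludes exactly the strings containing a character outside the base64 alphabet and its padding
-- character, on which A raises ValueError.
def Pre_b64_to_hex_py (a : String) : Prop :=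
  a.toList.all (fun ch => ch = '=' || pvB64map.contains ch) = true
instance (a : String) : Decidable (Pre_b64_to_hex_py a) := by unfold Pre_b64_to_hex_py; infer_instance

def pvWitness_b64_to_hex_py : String := "SGVsbG8="

def Spec_b64_to_hex_py (a : String) (out : String) : Prop := out = b64_to_hex_py_alt a
instance (a : String) (out : String) : Decidable (Spec_b64_to_hex_py a out) := by unfold Spec_b64_to_hex_py; infer_instance

-- ===== CLAIM (what is proved, stated in full; the proofs are below) =====
def Claim_equal_b64_to_hex_py : Prop := ∀ (a : String), Dom_b64_to_hex_py a → Pre_b64_to_hex_py a → Spec_b64_to_hex_py a (b64_to_hex_py a)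

-- ===== LEMMAS AND PROOFS =====

-- A's state machine replayed on the list of already-looked-up 6-bit values
def pvFinA (e c : Nat) : String := if e = 1 then pvChrA (c <<< 2) else ""

def pvMach : List Nat → Nat → Nat → String
  | [], e, c => pvFinA e c
  | v :: vs, e, c =>
    if e = 0 then pvChrA (v >>> 2) ++ pvMach vs 1 (3 &&& v)
    else if e = 1 then pvChrA (c <<< 2 ||| v >>> 4) ++ pvMach vs 2 (15 &&& v)
    else if e = 2 then pvChrA c ++ pvChrA (v >>> 2) ++ pvMach vs 3 (3 &&& v)
    else pvChrA (c <<< 2 ||| v >>> 4) ++ pvChrA (15 &&& v) ++ pvMach vs 0 c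

def pvValsOf (cs : List Char) : List Nat := (cs.filter (fun ch => ch ≠ '=')).map pvIdxA

theorem pvFold_mach (cs : List Char) : ∀ (d : String) (e c : Nat),
    (let st := cs.foldl pvStepA (d, e, c)
     if st.2.1 = 1 then st.1 ++ pvChrA (st.2.2 <<< 2) else st.1)
    = d ++ pvMach (pvValsOf cs) e c := by
  induction cs with
  | nil => intro d e c; simp only [List.foldl_nil, pvValsOf, List.filter_nil, List.map_nil,
      pvMach, pvFinA]; split <;> simp
  | cons ch cs ih =>
    intro d e c
    simp only [pvValsOf] at ih ⊢
    by_cases h : ch = '='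
    · simp only [List.foldl_cons, pvStepA, h, if_true, List.filter_cons]
      simpa using ih d e c
    · simp only [List.foldl_cons, pvStepA, if_neg h, List.filter_cons, decide_not]
      have hf : (!decide (ch = '=')) = true := by simp [h]
      rw [hf]
      simp only [if_true, List.map_cons]
      by_cases h0 : e = 0
      · simp only [h0]
        rw [ih, pvMach]
        simp [show pvChrA = pvNibChar from rfl, String.append_assoc]
      · by_cases h1 : e = 1
        · simp only [h1]
          rw [ih, pvMach]
          simp [String.append_assoc]
        · by_cases h2 : e = 2
          · simp only [h2]
            rw [ih, pvMach]
            simp [String.append_assoc]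
          · simp only [if_neg h0, if_neg h1, if_neg h2]
            rw [ih, pvMach]
            simp [h0, h1, h2, String.append_assoc]

theorem pvMach_zero_c (vs : List Nat) (c c' : Nat) : pvMach vs 0 c = pvMach vs 0 c' := by
  cases vs <;> simp [pvMach, pvFinA]

theorem pvMach_pack (vs : List Nat) (hb : ∀ v ∈ vs, v < 64) : pvMach vs 0 0 = pvPackB vs := by
  have hsr2 : ∀ v < 64, v >>> 2 = v / 4 := by decide
  have hand3 : ∀ v < 64, 3 &&& v = v % 4 := by decide
  have hand15 : ∀ v < 64, 15 &&& v = v % 16 := by decide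
  have hor : ∀ c < 4, ∀ v < 64, (c <<< 2 ||| v >>> 4) = c * 4 + v / 16 := by decide
  have hsl : ∀ c < 4, c <<< 2 = c * 4 := by decide
  induction vs using pvPackB.induct with
  | case5 => rfl
  | case2 v0 =>
    have h0 : v0 < 64 := hb v0 (by simp)
    simp only [pvMach, pvFinA, pvPackB, pvNibbles, pvNibDigits, List.reverse_cons,
      List.reverse_nil, List.nil_append, List.singleton_append, String.join]
    rw [hsr2 v0 h0, hand3 v0 h0, hsl _ (by omega)]
    rw [show v0 * 4 / 16 % 16 = v0 / 4 from by omega, show v0 * 4 % 16 = v0 % 4 * 4 from by omega]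
    simp [show pvChrA = pvNibChar from rfl]
  | case3 v0 v1 =>
    have h0 : v0 < 64 := hb v0 (by simp)
    have h1 : v1 < 64 := hb v1 (by simp)
    simp only [pvMach, pvFinA, pvPackB, pvNibbles, pvNibDigits, List.reverse_cons,
      List.reverse_nil, List.nil_append, List.singleton_append, String.join]
    rw [hsr2 v0 h0, hand3 v0 h0, hor _ (by omega) v1 h1]
    rw [show (v0 * 64 + v1) / 16 / 16 % 16 = v0 / 4 from by omega,
        show (v0 * 64 + v1) / 16 % 16 = v0 % 4 * 4 + v1 / 16 from by omega]
    simp [show pvChrA = pvNibChar from rfl]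
  | case4 v0 v1 v2 =>
    have h0 : v0 < 64 := hb v0 (by simp)
    have h1 : v1 < 64 := hb v1 (by simp)
    have h2 : v2 < 64 := hb v2 (by simp)
    simp only [pvMach, pvFinA, pvPackB, pvNibbles, pvNibDigits, List.reverse_cons,
      List.reverse_nil, List.nil_append, List.singleton_append, String.join]
    rw [hsr2 v0 h0, hand3 v0 h0, hor _ (by omega) v1 h1, hand15 v1 h1, hsr2 v2 h2]
    rw [show (v0 * 4096 + v1 * 64 + v2) / 4 / 16 / 16 / 16 % 16 = v0 / 4 from by omega,
        show (v0 * 4096 + v1 * 64 + v2) / 4 / 16 / 16 % 16 = v0 % 4 * 4 + v1 / 16 from by omega,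
        show (v0 * 4096 + v1 * 64 + v2) / 4 / 16 % 16 = v1 % 16 from by omega,
        show (v0 * 4096 + v1 * 64 + v2) / 4 % 16 = v2 / 4 from by omega]
    simp [show pvChrA = pvNibChar from rfl, String.append_assoc]
  | case1 v0 v1 v2 v3 rest ih =>
    have h0 : v0 < 64 := hb v0 (by simp)
    have h1 : v1 < 64 := hb v1 (by simp)
    have h2 : v2 < 64 := hb v2 (by simp)
    have h3 : v3 < 64 := hb v3 (by simp)
    have hrest : ∀ v ∈ rest, v < 64 := fun v hv => hb v (by simp [hv])
    simp only [pvMach, pvPackB, pvNibbles, pvNibDigits, List.reverse_cons,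
      List.reverse_nil, List.nil_append, List.singleton_append, String.join]
    rw [pvMach_zero_c rest (3 &&& v2) 0]
    rw [hsr2 v0 h0, hand3 v0 h0, hor _ (by omega) v1 h1, hand15 v1 h1, hsr2 v2 h2,
        hand3 v2 h2, hor _ (by omega) v3 h3, hand15 v3 h3]
    rw [show (((v0 * 64 + v1) * 64 + v2) * 64 + v3) / 16 / 16 / 16 / 16 / 16 % 16 = v0 / 4 from by omega,
        show (((v0 * 64 + v1) * 64 + v2) * 64 + v3) / 16 / 16 / 16 / 16 % 16 = v0 % 4 * 4 + v1 / 16 from by omega,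
        show (((v0 * 64 + v1) * 64 + v2) * 64 + v3) / 16 / 16 / 16 % 16 = v1 % 16 from by omega,
        show (((v0 * 64 + v1) * 64 + v2) * 64 + v3) / 16 / 16 % 16 = v2 / 4 from by omega,
        show (((v0 * 64 + v1) * 64 + v2) * 64 + v3) / 16 % 16 = v2 % 4 * 4 + v3 / 16 from by omega,
        show (((v0 * 64 + v1) * 64 + v2) * 64 + v3) % 16 = v3 % 16 from by omega]
    rw [ih hrest]
    simp [show pvChrA = pvNibChar from rfl, String.append_assoc]

theorem pvVals_lt (a : String) (hp : Pre_b64_to_hex_py a) :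
    ∀ v ∈ pvValsOf a.toList, v < 64 := by
  intro v hv
  simp only [pvValsOf, List.mem_map, List.mem_filter] at hv
  obtain ⟨ch, ⟨hmem, hne⟩, rfl⟩ := hv
  unfold Pre_b64_to_hex_py at hp
  simp only [List.all_eq_true, Bool.or_eq_true, decide_eq_true_eq, List.contains_iff_mem] at hp
  rcases hp ch hmem with h | h
  · simp [h] at hne
  · have := List.idxOf_lt_length_of_mem h
    simpa [pvIdxA] using this

-- ===== VERDICT (by name: the statement is the Claim_ definition above) =====
theorem b64_to_hex_py_spec : Claim_equal_b64_to_hex_py := by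
  intro a _ hp
  unfold Spec_b64_to_hex_py b64_to_hex_py b64_to_hex_py_alt
  have h1 := pvFold_mach a.toList "" 0 0
  simp only at h1
  rw [h1]
  have h2 : (a.toList.filter (fun ch => ch ≠ '=')).map pvIdxB = pvValsOf a.toList := rfl
  rw [h2, pvMach_pack _ (pvVals_lt a hp)]
  simp
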